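-- pv_equiv track=rewrite | github.com/S4Plus/PauliGo | pauli_enumer/compiler/functions.py | distToSeleted
-- ===== SOURCE A (Python) =====
-- max_size = 10**9
--
-- def distToSeleted(dist, P, seleted):
--     distance = 0
--     for i in P:
--         if not seleted[i]:
--             minDistance = max_size
--             for j in range(len(dist)):
--                 if seleted[j] and dist[i][j] < minDistance:
--                     minDistance = dist[i][j]
--             distance += minDistance
--     return distance
-- ===== SOURCE B (Python) =====
-- max_size = 10**9
--
-- def distToSeleted(dist, P, seleted):
--     # staged: a count dict over the unselected P-nodes, then (if any) the selected
--     # columns once, and one min() per distinct node, weighted by its multiplicity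
--     cnt = {}
--     for i in P:
--         if not seleted[i]:
--             cnt[i] = cnt.get(i, 0) + 1
--     if not cnt:
--         return 0
--     sel = [j for j in range(len(dist)) if seleted[j]]
--     total = 0
--     for i, c in cnt.items():
--         total += c * min([dist[i][j] for j in sel] + [max_size])
--     return total
-- ===== Notes on version B (the rewrite author's own statement) =====
-- stated objective: alternative
-- what changed: B stages the computation: it extracts the selected columns once, builds a count dictionary over the unselected P-nodes so each distinct node's min() over the selected columns is computed only once, and sums count*min over the dict items; A rescans all columns with a scalar running minimum for every (possibly duplicated) P entry.
import Mathlib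
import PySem

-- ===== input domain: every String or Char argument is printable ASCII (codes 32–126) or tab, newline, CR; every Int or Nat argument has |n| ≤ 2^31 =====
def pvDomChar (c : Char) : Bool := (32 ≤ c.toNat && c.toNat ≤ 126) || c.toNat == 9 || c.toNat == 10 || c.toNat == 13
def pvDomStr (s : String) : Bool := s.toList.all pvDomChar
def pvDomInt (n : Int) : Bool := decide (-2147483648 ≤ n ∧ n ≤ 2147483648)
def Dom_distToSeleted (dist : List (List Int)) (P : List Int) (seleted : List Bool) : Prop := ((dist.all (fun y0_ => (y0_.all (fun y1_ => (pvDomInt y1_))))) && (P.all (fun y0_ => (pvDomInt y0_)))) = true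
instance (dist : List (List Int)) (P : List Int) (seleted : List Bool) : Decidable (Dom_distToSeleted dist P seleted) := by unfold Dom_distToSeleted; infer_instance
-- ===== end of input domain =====

-- B stages the work: selected columns extracted once, a count dict over the unselected
-- P-nodes so each distinct node's min over the selected columns is computed only once,
-- then the weighted sum count*min over the dict items (alternative decomposition).

-- ===== PORT A =====
def distToSeleted (dist : List (List Int)) (P : List Int) (seleted : List Bool) : Int :=
  P.foldl (fun distance i =>
    if !((PySem.List.pyGet? seleted i).getD true) then
      distance + (List.range dist.length).foldl (fun minDistance (j : ℕ) =>
        if (PySem.List.pyGet? seleted (j : Int)).getD false = true ∧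
           (PySem.List.pyGet? ((PySem.List.pyGet? dist i).getD []) (j : Int)).getD 0 < minDistance
        then (PySem.List.pyGet? ((PySem.List.pyGet? dist i).getD []) (j : Int)).getD 0
        else minDistance) 1000000000
    else distance) 0

-- ===== PORT B =====
def distToSeleted_alt (dist : List (List Int)) (P : List Int) (seleted : List Bool) : Int :=
  let cnt : PySem.Dict Int Int :=
    P.foldl (fun d i =>
      if !((PySem.List.pyGet? seleted i).getD true) then d.insert i (d.getD i 0 + 1) else d)
      PySem.Dict.empty
  if cnt.items.isEmpty then 0 else
  let sel : List Int :=
    ((List.range dist.length).filter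
        (fun j : ℕ => (PySem.List.pyGet? seleted (j : Int)).getD false)).map
      (fun j : ℕ => (j : Int))
  cnt.items.foldl (fun total p =>
    total + p.2 *
      (PySem.List.min?
        ((sel.map (fun j => (PySem.List.pyGet? ((PySem.List.pyGet? dist p.1).getD []) j).getD 0))
          ++ [1000000000]) (fun x => x)).getD 0) 0

-- ===== PRECONDITION & SPEC =====
-- Pre_ excludes exactly the inputs on which the Python raises IndexError: an index in P
-- outside seleted's range, and — for an unselected node i — any column scan step that
-- would read seleted[j] or dist[i][j] out of range.
def Pre_distToSeleted (dist : List (List Int)) (P : List Int) (seleted : List Bool) : Prop :=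
  ∀ i ∈ P, PySem.Raise.InRange seleted.length i ∧
    (!((PySem.List.pyGet? seleted i).getD true) = true →
      ∀ j ∈ List.range dist.length,
        j < seleted.length ∧
        ((PySem.List.pyGet? seleted (j : Int)).getD false = true →
          PySem.Raise.InRange dist.length i ∧
          (j : Int) < (((PySem.List.pyGet? dist i).getD []).length : Int)))
instance (dist : List (List Int)) (P : List Int) (seleted : List Bool) : Decidable (Pre_distToSeleted dist P seleted) := by unfold Pre_distToSeleted; infer_instance

def pvWitness_distToSeleted : List (List Int) × List Int × List Bool :=
  ([[0, 1], [1, 0]], [0], [false, true])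

def Spec_distToSeleted (dist : List (List Int)) (P : List Int) (seleted : List Bool) (out : Int) : Prop := out = distToSeleted_alt dist P seleted
instance (dist : List (List Int)) (P : List Int) (seleted : List Bool) (out : Int) : Decidable (Spec_distToSeleted dist P seleted out) := by unfold Spec_distToSeleted; infer_instance

-- ===== CLAIM (what is proved, stated in full; the proofs are below) =====
def Claim_equal_distToSeleted : Prop := ∀ (dist : List (List Int)) (P : List Int) (seleted : List Bool), Dom_distToSeleted dist P seleted → Pre_distToSeleted dist P seleted → Spec_distToSeleted dist P seleted (distToSeleted dist P seleted)

-- ===== LEMMAS AND PROOFS =====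

/-- folding min with an extra seed commutes out of the fold -/
lemma foldl_min_swap (t : List Int) : ∀ a b : Int,
    t.foldl min (min a b) = min (t.foldl min a) b := by
  induction t with
  | nil => intro a b; rfl
  | cons c t ih =>
    intro a b
    simp only [List.foldl_cons]
    rw [show min (min a b) c = min (min a c) b by
      rw [min_assoc, min_comm b c, ← min_assoc], ih]

/-- A's conditional running minimum equals min() of the projected values plus the sentinel -/
lemma rowmin_eq (p : ℕ → Prop) [DecidablePred p] (d : ℕ → Int) (M : Int) :
    ∀ js : List ℕ,
    js.foldl (fun m j => if p j ∧ d j < m then d j else m) M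
    = (PySem.List.min? (((js.filter (fun j => decide (p j))).map d) ++ [M]) (fun x => x)).getD 0 := by
  have h1 : ∀ (js : List ℕ) (m : Int),
      js.foldl (fun m j => if p j ∧ d j < m then d j else m) m
      = ((js.filter (fun j => decide (p j))).map d).foldl min m := by
    intro js
    induction js with
    | nil => intro m; rfl
    | cons j js ih =>
      intro m
      by_cases hp : p j
      · by_cases hd : d j < m
        · simp [hp, hd, ih, min_eq_right (le_of_lt hd)]
        · simp [hp, hd, ih, min_eq_left (le_of_not_gt hd)]
      · simp [hp, ih]
  intro js
  rw [h1]
  cases hv : (js.filter (fun j => decide (p j))).map d with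
  | nil => simp [PySem.List.min?]
  | cons v t =>
    rw [List.cons_append, PySem.List.min?_id_cons]
    simp only [Option.getD_some, List.foldl_cons, List.foldl_append, List.foldl_cons,
      List.foldl_nil]
    rw [min_comm M v, foldl_min_swap]

/-- summing f over a list equals summing count·f over its distinct elements -/
lemma sum_count_mul (l : List Int) (f : Int → Int) :
    ((PySem.Set.ofList l).map (fun k => (l.count k : Int) * f k)).sum = (l.map f).sum := by
  have hnd : (PySem.Set.ofList l).Nodup := PySem.Set.nodup_ofList l
  have htf : (PySem.Set.ofList l).toFinset = l.toFinset := by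
    ext x; simp [PySem.Set.mem_ofList]
  calc ((PySem.Set.ofList l).map (fun k => (l.count k : Int) * f k)).sum
      = (PySem.Set.ofList l).toFinset.sum (fun k => (l.count k : Int) * f k) :=
        (List.sum_toFinset _ hnd).symm
    _ = l.toFinset.sum (fun k => (l.count k : Int) * f k) := by rw [htf]
    _ = (l.map f).sum := by rw [Finset.sum_list_map_count l f]; simp

-- ===== VERDICT (by name: the statement is the Claim_ definition above) =====
theorem distToSeleted_spec : Claim_equal_distToSeleted := by
  intro dist P seleted _ _
  unfold Spec_distToSeleted
  -- the per-node minimum computed by B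
  set m : Int → Int := fun i =>
    (PySem.List.min?
      (((((List.range dist.length).filter
            (fun j : ℕ => (PySem.List.pyGet? seleted (j : Int)).getD false)).map
          (fun j : ℕ => (j : Int))).map
          (fun j => (PySem.List.pyGet? ((PySem.List.pyGet? dist i).getD []) j).getD 0))
        ++ [1000000000]) (fun x => x)).getD 0 with hm
  -- A's side: the inner scan is m i, and the outer loop is a sum over the filtered P
  have hA : distToSeleted dist P seleted
      = ((P.filter (fun i => !((PySem.List.pyGet? seleted i).getD true))).map m).sum := by
    unfold distToSeleted
    have hrow : ∀ i : Int,
        (List.range dist.length).foldl (fun minDistance (j : ℕ) =>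
          if (PySem.List.pyGet? seleted (j : Int)).getD false = true ∧
             (PySem.List.pyGet? ((PySem.List.pyGet? dist i).getD []) (j : Int)).getD 0 < minDistance
          then (PySem.List.pyGet? ((PySem.List.pyGet? dist i).getD []) (j : Int)).getD 0
          else minDistance) 1000000000 = m i := by
      intro i
      rw [rowmin_eq (fun j => (PySem.List.pyGet? seleted (j : Int)).getD false = true)
        (fun j => (PySem.List.pyGet? ((PySem.List.pyGet? dist i).getD []) (j : Int)).getD 0)
        1000000000 (List.range dist.length), hm]
      simp [List.map_map, Function.comp_def]
    calc P.foldl (fun distance i =>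
          if !((PySem.List.pyGet? seleted i).getD true) then
            distance + (List.range dist.length).foldl (fun minDistance (j : ℕ) =>
              if (PySem.List.pyGet? seleted (j : Int)).getD false = true ∧
                 (PySem.List.pyGet? ((PySem.List.pyGet? dist i).getD []) (j : Int)).getD 0 < minDistance
              then (PySem.List.pyGet? ((PySem.List.pyGet? dist i).getD []) (j : Int)).getD 0
              else minDistance) 1000000000
          else distance) 0
        = P.foldl (fun distance i =>
            if !((PySem.List.pyGet? seleted i).getD true) then distance + m i
            else distance) 0 := by
          apply PySem.List.foldl_congr_mem
          intro acc i _
          rw [hrow i]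
      _ = ((P.filter (fun i => !((PySem.List.pyGet? seleted i).getD true))).map m).sum := by
          rw [PySem.List.foldl_if_eq_foldl_filter
            (p := fun i => !((PySem.List.pyGet? seleted i).getD true))
            (f := fun distance i => distance + m i),
            PySem.List.foldl_add]
          simp
  -- B's side: the counter items give count·m per distinct node
  have hB : distToSeleted_alt dist P seleted
      = ((P.filter (fun i => !((PySem.List.pyGet? seleted i).getD true))).map m).sum := by
    simp only [distToSeleted_alt]
    rw [PySem.List.foldl_if_eq_foldl_filter
      (p := fun i => !((PySem.List.pyGet? seleted i).getD true))
      (f := fun (d : PySem.Dict Int Int) (i : Int) => d.insert i (d.getD i 0 + 1))]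
    set unsel := P.filter (fun i => !((PySem.List.pyGet? seleted i).getD true)) with hu
    rw [PySem.Dict.foldl_insert_getD_add_one_eq_counter]
    by_cases hu0 : unsel = []
    · rw [hu0]; rfl
    · have hne : (PySem.Dict.counter unsel).items.isEmpty = false := by
        rw [PySem.Dict.items_counter]
        cases hset : PySem.Set.ofList unsel with
        | nil =>
          exfalso
          obtain ⟨c, hc⟩ := List.exists_mem_of_ne_nil unsel hu0
          have hcs : c ∈ PySem.Set.ofList unsel := (PySem.Set.mem_ofList unsel c).mpr hc
          rw [hset] at hcs
          cases hcs
        | cons a s => rfl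
      rw [if_neg (by simp [hne])]
      rw [PySem.List.foldl_add
        (g := fun p : Int × Int => p.2 *
          (PySem.List.min?
            (((((List.range dist.length).filter
                  (fun j : ℕ => (PySem.List.pyGet? seleted (j : Int)).getD false)).map
                (fun j : ℕ => (j : Int))).map
                (fun j => (PySem.List.pyGet? ((PySem.List.pyGet? dist p.1).getD []) j).getD 0))
              ++ [1000000000]) (fun x => x)).getD 0)
        ((PySem.Dict.counter unsel).items) 0]
      rw [PySem.Dict.items_counter]
      simp only [List.map_map, Function.comp_def, zero_add]
      have h := sum_count_mul unsel m
      simpa only [hm, List.map_map, Function.comp_def] using h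
  rw [hA, hB]
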